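-- pv_equiv track=rewrite | github.com/pypi-data/pypi-mirror-398 | packages/sqlalchemy-zen/sqlalchemy_zen-16.10.0-py2.py3-none-any.whl/sqlalchemy_zen/base.py | _is_critical_sql_pattern
-- ===== SOURCE A (Python) =====
-- def _is_critical_sql_pattern(sql, contexts):
--     """Determine if patterns are in critical SQL locations that would cause errors"""
--     critical_indicators = [
--         'SELECT << ??? >>',
--         'FROM << ??? >>',
--         'WHERE << ??? >>',
--         'UPDATE << ??? >>',
--         'INSERT << ??? >>',
--         'DELETE << ??? >>'
--     ]
--
--     for context in contexts:
--         for indicator in critical_indicators: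
--             if indicator.replace(' << ??? >>', ' << ??? >>') in context:
--                 return True
--     return False
-- ===== SOURCE B (Python) =====
-- def _is_critical_sql_pattern(sql, contexts):
--     """Check whether any context contains a placeholder marker directly preceded by a critical SQL keyword."""
--     keywords = ('SELECT', 'FROM', 'WHERE', 'UPDATE', 'INSERT', 'DELETE')
--     marker = ' << ??? >>'
--     for context in contexts:
--         j = context.find(marker)
--         while j != -1:
--             if context[:j].endswith(keywords):
--                 return True
--             j = context.find(marker, j + 1)
--     return False
-- ===== Notes on version B (the rewrite author's own statement) =====
-- stated objective: faster
-- what changed: Instead of testing each of the six full indicator strings for substring containment, B searches each context once for the shared marker ' << ??? >>' with str.find, stepping through its occurrences, and checks whether the text before each occurrence ends with one of the six SQL keywords.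
import Mathlib
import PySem

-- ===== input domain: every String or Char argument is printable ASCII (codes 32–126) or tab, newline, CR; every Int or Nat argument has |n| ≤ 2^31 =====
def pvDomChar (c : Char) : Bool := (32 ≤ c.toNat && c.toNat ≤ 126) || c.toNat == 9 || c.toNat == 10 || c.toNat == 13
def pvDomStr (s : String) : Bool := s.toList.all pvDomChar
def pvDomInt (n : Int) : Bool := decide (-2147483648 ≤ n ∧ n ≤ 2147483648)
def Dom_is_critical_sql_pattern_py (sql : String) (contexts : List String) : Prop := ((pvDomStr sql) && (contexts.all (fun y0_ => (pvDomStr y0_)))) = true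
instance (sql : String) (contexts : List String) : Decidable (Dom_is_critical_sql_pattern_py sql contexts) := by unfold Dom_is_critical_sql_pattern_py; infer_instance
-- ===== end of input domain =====

-- B replaces A's six whole-indicator substring scans by one str.find walk per context over
-- the occurrences of the shared marker ' << ??? >>', testing the keyword ending just before
-- each occurrence — one substring search per context instead of six (objective: faster, measured).

-- ===== PORT A =====
def pvCriticalIndicators : List String :=
  ["SELECT << ??? >>", "FROM << ??? >>", "WHERE << ??? >>",
   "UPDATE << ??? >>", "INSERT << ??? >>", "DELETE << ??? >>"]

-- A: for each context, for each indicator, `indicator.replace(' << ??? >>', ' << ??? >>') in context`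
-- (the no-op replace is transliterated); early `return True` = List.any.
def is_critical_sql_pattern_py (sql : String) (contexts : List String) : Bool :=
  contexts.any (fun context =>
    pvCriticalIndicators.any (fun indicator =>
      PySem.Str.isIn (PySem.Str.replace indicator " << ??? >>" " << ??? >>") context))

-- ===== PORT B =====
def pvKeywords : List String := ["SELECT", "FROM", "WHERE", "UPDATE", "INSERT", "DELETE"]
def pvMarker : List Char := " << ??? >>".toList

-- termination lemma for the while loop: a successful find lands at an index in [start, length)
theorem pv_found_bounds (c : List Char) (start : Nat)
    (h : PySem.Chars.findFrom c pvMarker (start : Int) none ≠ -1) :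
    start ≤ (PySem.Chars.findFrom c pvMarker (start : Int) none).toNat ∧
    (PySem.Chars.findFrom c pvMarker (start : Int) none).toNat < c.length := by
  by_cases hle : start ≤ c.length
  · obtain ⟨h1, h2, -⟩ := PySem.Chars.findFrom_natCast_spec c pvMarker start hle h
    have hlen : pvMarker.length ≤ (c.drop (PySem.Chars.findFrom c pvMarker (start : Int) none).toNat).length :=
      h2.length_le
    have hm : pvMarker.length = 10 := by decide
    simp [hm] at hlen
    constructor <;> omega
  · exfalso
    apply h
    simp only [PySem.Chars.findFrom]
    have h0 : ¬ ((start : Int) < 0) := by omega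
    rw [if_neg h0, if_pos (by omega)]

-- B's while loop: j = context.find(marker, start); while j != -1: if context[:j].endswith(keywords):
-- return True; j = context.find(marker, j + 1)
def pvScan (context : List Char) (start : Nat) : Bool :=
  let j := PySem.Chars.findFrom context pvMarker (start : Int) none
  if hj : j = -1 then false
  else if pvKeywords.any (fun kw => PySem.Chars.endswith (context.take j.toNat) kw.toList) then true
  else pvScan context (j.toNat + 1)
termination_by context.length + 1 - start
decreasing_by
  have := pv_found_bounds context start hj
  omega

def is_critical_sql_pattern_py_alt (sql : String) (contexts : List String) : Bool :=
  contexts.any (fun context => pvScan context.toList 0)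

-- ===== PRECONDITION & SPEC =====
def Spec_is_critical_sql_pattern_py (sql : String) (contexts : List String) (out : Bool) : Prop := out = is_critical_sql_pattern_py_alt sql contexts
instance (sql : String) (contexts : List String) (out : Bool) : Decidable (Spec_is_critical_sql_pattern_py sql contexts out) := by unfold Spec_is_critical_sql_pattern_py; infer_instance

-- ===== CLAIM (what is proved, stated in full; the proofs are below) =====
def Claim_equal_is_critical_sql_pattern_py : Prop := ∀ (sql : String) (contexts : List String), Dom_is_critical_sql_pattern_py sql contexts → Spec_is_critical_sql_pattern_py sql contexts (is_critical_sql_pattern_py sql contexts)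

-- ===== LEMMAS AND PROOFS =====

-- if the (nonempty) marker starts at j, then j is a real index bound
theorem pv_marker_le_length {c : List Char} {j : ℕ} (h : pvMarker <+: c.drop j) : j ≤ c.length := by
  by_contra hc
  rw [List.drop_eq_nil_of_le (by omega)] at h
  exact absurd (List.prefix_nil.mp h) (by decide)

-- a marker occurrence at j ≥ start is an occurrence inside drop start
theorem pv_infix_drop {c : List Char} {start j : ℕ} (hs : start ≤ j) (h : pvMarker <+: c.drop j) :
    pvMarker <:+: c.drop start := by
  have : c.drop j = (c.drop start).drop (j - start) := by
    rw [List.drop_drop]; congr 1; omega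
  rw [this] at h
  exact h.isInfix.trans (List.drop_suffix _ _).isInfix

-- the while loop finds exactly the marker occurrences at ≥ start with a keyword ending before them
theorem pvScan_iff (c : List Char) (start : Nat) :
    pvScan c start = true ↔
    ∃ j, start ≤ j ∧ pvMarker <+: c.drop j ∧
      ∃ kw ∈ pvKeywords, kw.toList <:+ c.take j := by
  induction start using pvScan.induct (context := c) with
  | case1 x j hj =>
    rw [pvScan, dif_pos hj]
    simp only [Bool.false_eq_true, false_iff]
    rintro ⟨j, hsj, hm, -⟩
    by_cases hle : x ≤ c.length
    · exact absurd (pv_infix_drop hsj hm)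
        ((PySem.Chars.findFrom_natCast_eq_neg_one_iff c pvMarker x hle).mp hj)
    · have := pv_marker_le_length hm
      omega
  | case2 x j hj hkw =>
    rw [pvScan, dif_neg hj, if_pos hkw]
    simp only [true_iff]
    have hb := pv_found_bounds c x hj
    obtain ⟨-, hm, -⟩ := PySem.Chars.findFrom_natCast_spec c pvMarker x (by omega) hj
    obtain ⟨kw, hkwmem, hend⟩ := List.any_eq_true.mp hkw
    exact ⟨_, hb.1, hm, kw, hkwmem, (PySem.Chars.endswith_iff _ _).mp hend⟩
  | case3 x j hj hkw ih =>
    rw [pvScan, dif_neg hj, if_neg hkw, ih]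
    have hb := pv_found_bounds c x hj
    obtain ⟨-, hm0, hmin⟩ := PySem.Chars.findFrom_natCast_spec c pvMarker x (by omega) hj
    constructor
    · rintro ⟨j, hsj, hm, hk⟩
      exact ⟨j, by omega, hm, hk⟩
    · rintro ⟨j, hsj, hm, kw, hkwmem, hend⟩
      refine ⟨j, ?_, hm, kw, hkwmem, hend⟩
      rcases Nat.lt_or_ge j ((PySem.Chars.findFrom c pvMarker (x : Int) none).toNat) with hlt | hge
      · exact absurd hm (hmin j hsj hlt)
      · rcases Nat.eq_or_lt_of_le hge with heq | hlt
        · exfalso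
          rw [Bool.not_eq_true, List.any_eq_false] at hkw
          exact absurd ((PySem.Chars.endswith_iff _ _).mpr (heq ▸ hend)) (by
            simpa using hkw kw hkwmem)
        · omega

-- occurrences of kw ++ marker in l are exactly cuts j with marker after and kw before
theorem pv_infix_append_iff (k s l : List Char) :
    (k ++ s) <:+: l ↔ ∃ j, j ≤ l.length ∧ s <+: l.drop j ∧ k <:+ l.take j := by
  constructor
  · rintro ⟨p, q, hl⟩
    refine ⟨p.length + k.length, ?_, ?_, ?_⟩
    · have : l.length = p.length + k.length + (s.length + q.length) := by
        subst hl; simp; omega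
      omega
    · have : l.drop (p.length + k.length) = s ++ q := by
        subst hl; simp
      exact this ▸ ⟨q, rfl⟩
    · have : l.take (p.length + k.length) = p ++ k := by
        subst hl
        rw [show p ++ (k ++ s) ++ q = (p ++ k) ++ (s ++ q) by simp]
        rw [List.take_append_of_le_length (by simp)]
        simp
      exact this ▸ ⟨p, rfl⟩
  · rintro ⟨j, hj, ⟨q, hq⟩, ⟨p, hp⟩⟩
    refine ⟨p, q, ?_⟩
    calc p ++ (k ++ s) ++ q = (p ++ k) ++ (s ++ q) := by simp
      _ = l.take j ++ l.drop j := by rw [← hp, ← hq]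
      _ = l := List.take_append_drop j l

theorem pv_per_context (c : String) :
    pvCriticalIndicators.any (fun indicator =>
      PySem.Str.isIn (PySem.Str.replace indicator " << ??? >>" " << ??? >>") c)
    = pvScan c.toList 0 := by
  have key : ∀ kw : String,
      PySem.Str.isIn (String.ofList (kw.toList ++ pvMarker)) c = true ↔
      ∃ j, j ≤ c.toList.length ∧ pvMarker <+: c.toList.drop j ∧ kw.toList <:+ c.toList.take j := by
    intro kw
    rw [PySem.Str.isIn_iff_infix]
    simpa [String.toList_ofList] using pv_infix_append_iff kw.toList pvMarker c.toList
  have lhs : (pvCriticalIndicators.any (fun indicator =>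
      PySem.Str.isIn (PySem.Str.replace indicator " << ??? >>" " << ??? >>") c)) = true ↔
      ∃ kw ∈ pvKeywords, ∃ j, j ≤ c.toList.length ∧
        pvMarker <+: c.toList.drop j ∧ kw.toList <:+ c.toList.take j := by
    have e1 : PySem.Str.replace "SELECT << ??? >>" " << ??? >>" " << ??? >>" = String.ofList ("SELECT".toList ++ pvMarker) := by decide
    have e2 : PySem.Str.replace "FROM << ??? >>" " << ??? >>" " << ??? >>" = String.ofList ("FROM".toList ++ pvMarker) := by decide
    have e3 : PySem.Str.replace "WHERE << ??? >>" " << ??? >>" " << ??? >>" = String.ofList ("WHERE".toList ++ pvMarker) := by decide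
    have e4 : PySem.Str.replace "UPDATE << ??? >>" " << ??? >>" " << ??? >>" = String.ofList ("UPDATE".toList ++ pvMarker) := by decide
    have e5 : PySem.Str.replace "INSERT << ??? >>" " << ??? >>" " << ??? >>" = String.ofList ("INSERT".toList ++ pvMarker) := by decide
    have e6 : PySem.Str.replace "DELETE << ??? >>" " << ??? >>" " << ??? >>" = String.ofList ("DELETE".toList ++ pvMarker) := by decide
    simp only [pvCriticalIndicators, pvKeywords, List.any_cons, List.any_nil,
      Bool.or_eq_true, Bool.or_false, e1, e2, e3, e4, e5, e6, key,
      List.mem_cons, List.not_mem_nil, exists_eq_or_imp, exists_eq_left, or_false]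
  rw [Bool.eq_iff_iff, lhs, pvScan_iff]
  constructor
  · rintro ⟨kw, hkw, j, hj, hm, he⟩
    exact ⟨j, Nat.zero_le j, hm, kw, hkw, he⟩
  · rintro ⟨j, -, hm, kw, hkw, he⟩
    exact ⟨kw, hkw, j, pv_marker_le_length hm, hm, he⟩

-- ===== VERDICT (by name: the statement is the Claim_ definition above) =====
theorem is_critical_sql_pattern_py_spec : Claim_equal_is_critical_sql_pattern_py := by
  intro sql contexts _
  unfold Spec_is_critical_sql_pattern_py is_critical_sql_pattern_py is_critical_sql_pattern_py_alt
  exact congrArg contexts.any (funext pv_per_context)
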